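-- pv_equiv track=rewrite | github.com/anushasyed/dropbox_texteditor | text_edit.py | textEditor
-- ===== SOURCE A (Python) =====
-- def textEditor(input):
--     ordered = sorted(input) # sorts in chrnological order
--     ret_val = ''
--     stack = [] # needed for undo/redo
--     selected_data = []
--     queue = []
--     for order in ordered:
--         command = order[1]
--         if command == 'APPEND':
--             queue = []
--             data = order[2]
--             if selected_data:
--                 ret_val = ret_val[:selected_data[0]] + data + ret_val[selected_data[1]:]
--                 selected_data = []
--             else:
--                 ret_val += data
--             stack.append(ret_val)
--         elif command == 'BACKSPACE':
--             queue = []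
--             if not selected_data:
--                 ret_val = ret_val[:-1]
--             else:
--                 ret_val = ret_val[0:selected_data[0]] + ret_val[selected_data[1]:]
--                 selected_data = []
--             stack.append(ret_val)
--         elif command == 'REDO':
--             if queue:
--                 ret_val = queue.pop(0)
--         elif command == 'UNDO':
--             if stack:
--                 last = stack.pop()
--                 queue = [last] + queue
--                 if stack:
--                     ret_val = stack[-1]
--                 else:
--                     ret_val = ''
--
--         elif command == 'SELECT':
--             queue = []
--             selected_data = [int(order[2]), int(order[3])]
--         elif command == 'BOLD':
--             queue = []
--             ret_val = ret_val[:selected_data[0]] + '*' + ret_val[selected_data[0]:selected_data[1]] + '*' + ret_val[selected_data[1]:]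
--             stack.append(ret_val)
--     return ret_val
-- ===== SOURCE B (Python) =====
-- def apply_edit(op, sel, data, text):
--     if op == 'APPEND':
--         lo, hi = sel if sel else (len(text), len(text))
--         return text[:lo] + data + text[hi:]
--     if op == 'BACKSPACE':
--         if sel:
--             lo, hi = sel
--             return text[:lo] + text[hi:]
--         return text[:-1]
--     lo, hi = sel  # BOLD
--     return text[:lo] + '*' + text[lo:hi] + '*' + text[hi:]
--
--
-- def build(edits, i):
--     # materialize the text produced by edit i by replaying its ancestor chain
--     if i < 0:
--         return ''
--     parent, op, sel, data = edits[i]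
--     return apply_edit(op, sel, data, build(edits, parent))
--
--
-- def textEditor(input):
--     # Log every committed edit as a node of a parent-pointer tree and move integer
--     # ids around for undo/redo; only the final text is ever materialized.
--     edits = []        # (parent id, command, selection, appended data)
--     cur = -1          # id of the edit producing the current text (-1: empty document)
--     undo_ids = []     # ids undo can return to, most recent last
--     redo_ids = []     # ids redo can restore, most recent last
--     selection = None
--     for cmd in sorted(input):
--         op = cmd[1]
--         if op == 'APPEND' or op == 'BACKSPACE' or op == 'BOLD':
--             edits.append((cur, op, selection, cmd[2] if op == 'APPEND' else ''))
--             cur = len(edits) - 1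
--             undo_ids.append(cur)
--             redo_ids = []
--             if op != 'BOLD':
--                 selection = None
--         elif op == 'SELECT':
--             selection = (int(cmd[2]), int(cmd[3]))
--             redo_ids = []
--         elif op == 'UNDO':
--             if undo_ids:
--                 redo_ids.append(undo_ids.pop())
--                 cur = undo_ids[-1] if undo_ids else -1
--         elif op == 'REDO':
--             if redo_ids:
--                 cur = redo_ids.pop()
--     return build(edits, cur)
-- ===== Notes on version B (the rewrite author's own statement) =====
-- stated objective: alternative
-- what changed: B replaces A's stacks of full text snapshots by a log of edit descriptions forming a parent-pointer tree: undo/redo move integer edit ids, and only the final text is materialized by replaying one ancestor chain; Pre_ excludes exactly the inputs where A raises (command shorter than 2 entries, APPEND without data, SELECT without two int-parsable entries, BOLD with no active selection).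
import Mathlib
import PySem

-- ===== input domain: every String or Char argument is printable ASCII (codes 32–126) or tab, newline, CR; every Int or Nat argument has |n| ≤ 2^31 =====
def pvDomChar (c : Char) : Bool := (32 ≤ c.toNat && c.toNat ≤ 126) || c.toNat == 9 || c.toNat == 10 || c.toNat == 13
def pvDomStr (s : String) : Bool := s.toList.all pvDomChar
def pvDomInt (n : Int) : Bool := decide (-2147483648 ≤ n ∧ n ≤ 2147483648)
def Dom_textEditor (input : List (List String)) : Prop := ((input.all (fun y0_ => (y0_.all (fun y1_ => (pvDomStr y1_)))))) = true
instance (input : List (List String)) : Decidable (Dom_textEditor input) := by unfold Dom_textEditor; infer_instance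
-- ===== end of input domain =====

-- B logs every committed edit as a node of a parent-pointer tree and moves integer ids for
-- undo/redo, materializing only the final text (objective: alternative).
-- Strings are carried as their character lists; Python's list-of-strings sort order is the
-- lexicographic order of the character-list lists, hence the sort key 'x.map String.toList'.

-- ===== PORT A =====
-- Python's sorted() on a list of lists of strings: lexicographic on the character lists
def pvSorted (input : List (List String)) : List (List String) :=
  PySem.List.sorted input (fun x => x.map String.toList) false

structure PvStA where
  ret : List Char
  stack : List (List Char)
  sel : List Int
  queue : List (List Char)

def pvStepA (st : PvStA) (order : List String) : Option PvStA :=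
  match PySem.List.pyGet? order 1 with
  | none => none
  | some command =>
    if command = "APPEND" then
      match PySem.List.pyGet? order 2 with
      | none => none
      | some data =>
        if st.sel ≠ [] then
          match PySem.List.pyGet? st.sel 0, PySem.List.pyGet? st.sel 1 with
          | some a, some b =>
            let r := PySem.List.slice st.ret none (some a) ++ data.toList ++ PySem.List.slice st.ret (some b) none
            some ⟨r, st.stack ++ [r], [], []⟩
          | _, _ => none
        else
          let r := st.ret ++ data.toList
          some ⟨r, st.stack ++ [r], st.sel, []⟩
    else if command = "BACKSPACE" then
      if st.sel = [] then
        let r := PySem.List.slice st.ret none (some (-1))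
        some ⟨r, st.stack ++ [r], st.sel, []⟩
      else
        match PySem.List.pyGet? st.sel 0, PySem.List.pyGet? st.sel 1 with
        | some a, some b =>
          let r := PySem.List.slice st.ret (some 0) (some a) ++ PySem.List.slice st.ret (some b) none
          some ⟨r, st.stack ++ [r], [], []⟩
        | _, _ => none
    else if command = "REDO" then
      if st.queue ≠ [] then
        match PySem.List.pop? st.queue 0 with
        | some (v, q') => some ⟨v, st.stack, st.sel, q'⟩
        | none => none
      else some st
    else if command = "UNDO" then
      if st.stack ≠ [] then
        match PySem.List.pop? st.stack (-1) with
        | some (last, s') =>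
          some ⟨if s' ≠ [] then PySem.List.pyGetD s' (-1) [] else [], s', st.sel, last :: st.queue⟩
        | none => none
      else some st
    else if command = "SELECT" then
      match PySem.List.pyGet? order 2, PySem.List.pyGet? order 3 with
      | some s2, some s3 =>
        match PySem.Int.ofStr? s2, PySem.Int.ofStr? s3 with
        | some a, some b => some ⟨st.ret, st.stack, [a, b], []⟩
        | _, _ => none
      | _, _ => none
    else if command = "BOLD" then
      match PySem.List.pyGet? st.sel 0, PySem.List.pyGet? st.sel 1 with
      | some a, some b =>
        let r := PySem.List.slice st.ret none (some a) ++ ['*'] ++ PySem.List.slice st.ret (some a) (some b)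
                   ++ ['*'] ++ PySem.List.slice st.ret (some b) none
        some ⟨r, st.stack ++ [r], st.sel, []⟩
      | _, _ => none
    else some st

def textEditor (input : List (List String)) : String :=
  match (pvSorted input).foldl
      (fun acc order => acc.bind (fun st => pvStepA st order)) (some ⟨[], [], [], []⟩) with
  | some st => String.ofList st.ret
  | none => ""

-- ===== PORT B =====
-- an edit node: parent edit id, command name, selection in force, appended data
structure PvEdit where
  parent : Int
  kind : String
  sel : Option (Int × Int)
  data : String

-- apply_edit(op, sel, data, text); 'none' where the Python raises (BOLD with no selection)
def pvApplyEdit (op : String) (sel : Option (Int × Int)) (data : String) (text : List Char) :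
    Option (List Char) :=
  if op = "APPEND" then
    let lohi := match sel with
      | some p => p
      | none => ((text.length : Int), (text.length : Int))
    some (PySem.List.slice text none (some lohi.1) ++ data.toList ++ PySem.List.slice text (some lohi.2) none)
  else if op = "BACKSPACE" then
    match sel with
    | some (lo, hi) => some (PySem.List.slice text none (some lo) ++ PySem.List.slice text (some hi) none)
    | none => some (PySem.List.slice text none (some (-1)))
  else
    match sel with
    | some (lo, hi) =>
      some (PySem.List.slice text none (some lo) ++ ['*'] ++ PySem.List.slice text (some lo) (some hi)
              ++ ['*'] ++ PySem.List.slice text (some hi) none)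
    | none => none

-- build(edits, i): replay edit i's ancestor chain; the fuel only makes the Python
-- recursion (terminating because parents precede children) structurally total
def pvBuildF : Nat → List PvEdit → Int → Option (List Char)
  | 0, _, i => if i < 0 then some [] else none
  | fuel + 1, edits, i =>
    if i < 0 then some []
    else
      (PySem.List.pyGet? edits i).bind fun e =>
        (pvBuildF fuel edits e.parent).bind fun text =>
          pvApplyEdit e.kind e.sel e.data text

def pvBuild (edits : List PvEdit) (i : Int) : Option (List Char) :=
  pvBuildF (i.toNat + 1) edits i

structure PvStB where
  edits : List PvEdit
  cur : Int
  undo : List Int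
  redo : List Int
  sel : Option (Int × Int)

def pvStepB (st : PvStB) (cmd : List String) : Option PvStB :=
  match PySem.List.pyGet? cmd 1 with
  | none => none
  | some op =>
    if op = "APPEND" ∨ op = "BACKSPACE" ∨ op = "BOLD" then
      match (if op = "APPEND" then PySem.List.pyGet? cmd 2 else some "") with
      | none => none
      | some data =>
        let edits' := st.edits ++ [⟨st.cur, op, st.sel, data⟩]
        some ⟨edits', (edits'.length : Int) - 1, st.undo ++ [(edits'.length : Int) - 1], [],
          if op ≠ "BOLD" then none else st.sel⟩
    else if op = "SELECT" then
      match PySem.List.pyGet? cmd 2, PySem.List.pyGet? cmd 3 with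
      | some s2, some s3 =>
        match PySem.Int.ofStr? s2, PySem.Int.ofStr? s3 with
        | some a, some b => some ⟨st.edits, st.cur, st.undo, [], some (a, b)⟩
        | _, _ => none
      | _, _ => none
    else if op = "UNDO" then
      if st.undo ≠ [] then
        match PySem.List.pop? st.undo (-1) with
        | some (u, undo') =>
          some ⟨st.edits, if undo' ≠ [] then PySem.List.pyGetD undo' (-1) 0 else -1, undo',
            st.redo ++ [u], st.sel⟩
        | none => none
      else some st
    else if op = "REDO" then
      if st.redo ≠ [] then
        match PySem.List.pop? st.redo (-1) with
        | some (r, redo') => some ⟨st.edits, r, st.undo, redo', st.sel⟩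
        | none => none
      else some st
    else some st

def textEditor_alt (input : List (List String)) : String :=
  match (pvSorted input).foldl (fun acc cmd => acc.bind (fun st => pvStepB st cmd))
      (some ⟨[], -1, [], [], none⟩) with
  | some st =>
    match pvBuild st.edits st.cur with
    | some t => String.ofList t
    | none => ""
  | none => ""

-- ===== PRECONDITION & SPEC =====
-- Pre_ excludes exactly the inputs on which the Python A raises: a command shorter than 2 entries
-- (IndexError on order[1]), APPEND without a data entry, SELECT without two int()-parsable entries
-- (IndexError/ValueError), and BOLD issued while no selection is active (IndexError on selected_data[0]);
-- a selection is active after a well-formed SELECT until the next APPEND/BACKSPACE, in sorted order.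
def pvCmdsOK : Bool → List (List String) → Bool
  | _, [] => true
  | act, cmd :: rest =>
    match PySem.List.pyGet? cmd 1 with
    | none => false
    | some op =>
      if op = "APPEND" then (PySem.List.pyGet? cmd 2).isSome && pvCmdsOK false rest
      else if op = "BACKSPACE" then pvCmdsOK false rest
      else if op = "SELECT" then
        (match PySem.List.pyGet? cmd 2, PySem.List.pyGet? cmd 3 with
         | some s2, some s3 => (PySem.Int.ofStr? s2).isSome && (PySem.Int.ofStr? s3).isSome
         | _, _ => false) && pvCmdsOK true rest
      else if op = "BOLD" then act && pvCmdsOK act rest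
      else pvCmdsOK act rest

def Pre_textEditor (input : List (List String)) : Prop :=
  pvCmdsOK false (pvSorted input) = true

instance (input : List (List String)) : Decidable (Pre_textEditor input) := by
  unfold Pre_textEditor; infer_instance

def pvWitness_textEditor : List (List String) :=
  [["1", "APPEND", "ab"], ["2", "SELECT", "0", "1"], ["3", "BOLD"], ["4", "UNDO"], ["5", "REDO"]]

def Spec_textEditor (input : List (List String)) (out : String) : Prop := out = textEditor_alt input
instance (input : List (List String)) (out : String) : Decidable (Spec_textEditor input out) := by
  unfold Spec_textEditor; infer_instance

-- ===== CLAIM (what is proved, stated in full; the proofs are below) =====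
def Claim_equal_textEditor : Prop :=
  ∀ (input : List (List String)), Dom_textEditor input → Pre_textEditor input →
    Spec_textEditor input (textEditor input)

-- ===== LEMMAS AND PROOFS =====
def pvSelList : Option (Int × Int) → List Int
  | none => []
  | some (a, b) => [a, b]

-- selection state after a command, mirroring pvCmdsOK's flag
def pvNextAct (op : String) (act : Bool) : Bool :=
  if op = "APPEND" ∨ op = "BACKSPACE" then false
  else if op = "SELECT" then true
  else act

-- well-formed edit log: every parent precedes its child
def PvWF (edits : List PvEdit) : Prop :=
  ∀ k (h : k < edits.length), -1 ≤ edits[k].parent ∧ edits[k].parent < (k : Int)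

-- the simulation invariant: materializing B's ids yields A's strings
def PvInv (sa : PvStA) (sb : PvStB) (act : Bool) : Prop :=
  PvWF sb.edits ∧
  (-1 ≤ sb.cur ∧ sb.cur < (sb.edits.length : Int)) ∧
  (∀ i ∈ sb.undo, -1 ≤ i ∧ i < (sb.edits.length : Int)) ∧
  (∀ i ∈ sb.redo, -1 ≤ i ∧ i < (sb.edits.length : Int)) ∧
  pvBuild sb.edits sb.cur = some sa.ret ∧
  sb.undo.map (pvBuild sb.edits) = sa.stack.map some ∧
  sb.redo.map (pvBuild sb.edits) = sa.queue.reverse.map some ∧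
  sa.sel = pvSelList sb.sel ∧
  act = sb.sel.isSome

theorem pvBuildF_neg (fuel : ℕ) (edits : List PvEdit) (i : Int) (h : i < 0) :
    pvBuildF fuel edits i = some [] := by
  cases fuel <;> simp [pvBuildF, h]

theorem pvBuildF_fuel (fuel : ℕ) : ∀ (fuel' : ℕ) (edits : List PvEdit) (i : Int),
    PvWF edits → i.toNat < fuel → i.toNat < fuel' → i < (edits.length : Int) →
    pvBuildF fuel edits i = pvBuildF fuel' edits i := by
  induction fuel with
  | zero => intro fuel' edits i _ h1 _ _; omega
  | succ f ih =>
    intro fuel' edits i hwf h1 h2 hlen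
    by_cases hneg : i < 0
    · rw [pvBuildF_neg _ _ _ hneg, pvBuildF_neg _ _ _ hneg]
    · cases fuel' with
      | zero => omega
      | succ f' =>
        have hi : 0 ≤ i := by omega
        have hilt : i.toNat < edits.length := by omega
        simp only [pvBuildF, if_neg hneg,
          PySem.List.pyGet?_eq_some_getElem edits hi (by exact_mod_cast hlen), Option.bind_some]
        have hp := hwf i.toNat hilt
        by_cases hpneg : edits[i.toNat].parent < 0
        · rw [pvBuildF_neg _ _ _ hpneg, pvBuildF_neg _ _ _ hpneg]
        · rw [ih f' edits edits[i.toNat].parent hwf (by omega) (by omega) (by omega)]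

theorem pvBuildF_append (fuel : ℕ) : ∀ (edits : List PvEdit) (e : PvEdit) (i : Int),
    PvWF edits → i < (edits.length : Int) →
    pvBuildF fuel (edits ++ [e]) i = pvBuildF fuel edits i := by
  induction fuel with
  | zero => intro edits e i _ _; simp [pvBuildF]
  | succ f ih =>
    intro edits e i hwf hlen
    by_cases hneg : i < 0
    · rw [pvBuildF_neg _ _ _ hneg, pvBuildF_neg _ _ _ hneg]
    · have hi : 0 ≤ i := by omega
      have hilt : i.toNat < edits.length := by omega
      have hg1 : PySem.List.pyGet? (edits ++ [e]) i = some edits[i.toNat] := by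
        rw [PySem.List.pyGet?_eq_some_getElem (edits ++ [e]) hi (by simp <;> omega)]
        congr 1
        exact List.getElem_append_left hilt
      simp only [pvBuildF, if_neg hneg, hg1,
        PySem.List.pyGet?_eq_some_getElem edits hi (by exact_mod_cast hlen), Option.bind_some]
      have hp := hwf i.toNat hilt
      rw [ih edits e edits[i.toNat].parent hwf (by omega)]

theorem pvBuild_append (edits : List PvEdit) (e : PvEdit) (i : Int)
    (hwf : PvWF edits) (hlen : i < (edits.length : Int)) :
    pvBuild (edits ++ [e]) i = pvBuild edits i :=
  pvBuildF_append _ edits e i hwf hlen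

theorem pvBuild_concat (edits : List PvEdit) (e : PvEdit) (text : List Char)
    (hwf : PvWF edits) (_hp1 : -1 ≤ e.parent) (hp2 : e.parent < (edits.length : Int))
    (hb : pvBuild edits e.parent = some text) :
    pvBuild (edits ++ [e]) ((edits.length : Int)) = pvApplyEdit e.kind e.sel e.data text := by
  unfold pvBuild
  have ht : ((edits.length : Int)).toNat = edits.length := by omega
  rw [ht]
  have hg : PySem.List.pyGet? (edits ++ [e]) ((edits.length : Int)) = some e := by
    have h' : edits ++ [e] = edits ++ e :: [] := rfl
    rw [h', PySem.List.pyGet?_append_length]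
  simp only [pvBuildF, if_neg (show ¬((edits.length : Int) < 0) by omega), hg, Option.bind_some]
  by_cases hneg : e.parent < 0
  · have htext : text = [] := by
      unfold pvBuild at hb
      rw [pvBuildF_neg _ _ _ hneg] at hb
      exact (Option.some.injEq _ _ ▸ hb).symm
    rw [pvBuildF_neg _ _ _ hneg, htext]
    rfl
  · have h1 : pvBuildF edits.length (edits ++ [e]) e.parent = pvBuildF edits.length edits e.parent :=
      pvBuildF_append _ edits e e.parent hwf hp2
    have h2 : pvBuildF edits.length edits e.parent = pvBuildF (e.parent.toNat + 1) edits e.parent :=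
      pvBuildF_fuel _ _ edits e.parent hwf (by omega) (by omega) hp2
    unfold pvBuild at hb
    rw [h1, h2, hb]
    rfl

theorem pvWF_append (edits : List PvEdit) (e : PvEdit)
    (hwf : PvWF edits) (hp1 : -1 ≤ e.parent) (hp2 : e.parent < (edits.length : Int)) :
    PvWF (edits ++ [e]) := by
  intro k hk
  simp only [List.length_append, List.length_cons, List.length_nil] at hk
  by_cases hlt : k < edits.length
  · rw [List.getElem_append_left hlt]
    exact hwf k hlt
  · have hke : k = edits.length := by omega
    subst hke
    rw [List.getElem_append_right (le_refl _)]
    simpa using ⟨hp1, hp2⟩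

theorem pvGetLastD_eq_getLast {α : Type} (l : List α) (d : α) (h : l ≠ []) :
    l.getLastD d = l.getLast h := by
  rcases List.eq_nil_or_concat l with rfl | ⟨ys, y, rfl⟩
  · exact absurd rfl h
  · simp

theorem pvMapSplit (f : Int → Option (List Char)) (us : List Int) (u : Int)
    (xs : List (List Char)) (x : List Char)
    (h : (us ++ [u]).map f = (xs ++ [x]).map some) :
    us.map f = xs.map some ∧ f u = some x := by
  rw [List.map_append, List.map_append] at h
  have hlen : us.length = xs.length := by
    have := congrArg List.length h
    simp at this
    omega
  have := List.append_inj h (by simp [hlen])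
  refine ⟨this.1, ?_⟩
  have h2 := this.2
  simp at h2
  exact h2

theorem pvMapLast (f : Int → Option (List Char)) (us : List Int) (xs : List (List Char))
    (h : us.map f = xs.map some) (hne : us ≠ []) :
    xs ≠ [] ∧ f (us.getLastD 0) = some (xs.getLastD []) := by
  have hxs_ne : xs ≠ [] := by
    intro hnil
    subst hnil
    have := congrArg List.length h
    simp at this
    exact hne this
  rcases List.eq_nil_or_concat us with rfl | ⟨vs, v, rfl⟩
  · exact absurd rfl hne
  · rcases List.eq_nil_or_concat xs with rfl | ⟨ws, w, rfl⟩
    · exact absurd rfl hxs_ne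
    · simp only [List.concat_eq_append] at h ⊢
      have := pvMapSplit f vs v ws w h
      exact ⟨by simp, by simpa [List.getLastD_concat] using this.2⟩

-- one simulation step: under the per-command well-formedness facts Pre_ supplies,
-- both steps succeed and the invariant is preserved
theorem pvStep_rel (sa : PvStA) (sb : PvStB) (act : Bool) (cmd : List String) (op : String)
    (h : PvInv sa sb act) (hop : PySem.List.pyGet? cmd 1 = some op)
    (hAok : op = "APPEND" → (PySem.List.pyGet? cmd 2).isSome)
    (hSok : op = "SELECT" → ∃ s2 s3 x y, PySem.List.pyGet? cmd 2 = some s2 ∧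
      PySem.List.pyGet? cmd 3 = some s3 ∧ PySem.Int.ofStr? s2 = some x ∧ PySem.Int.ofStr? s3 = some y)
    (hBok : op = "BOLD" → act = true) :
    ∃ sa' sb', pvStepA sa cmd = some sa' ∧ pvStepB sb cmd = some sb' ∧
      PvInv sa' sb' (pvNextAct op act) := by
  obtain ⟨W1, W2, W3, W4, E1, E2, E3, S1, S2⟩ := h
  by_cases hA : op = "APPEND"
  · subst hA
    obtain ⟨data, hdata⟩ := Option.isSome_iff_exists.mp (hAok rfl)
    cases hsel : sb.sel with
    | none =>
      have hsa : sa.sel = [] := by rw [S1, hsel]; rfl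
      set r := sa.ret ++ data.toList with hr
      set e : PvEdit := ⟨sb.cur, "APPEND", none, data⟩ with he
      refine ⟨⟨r, sa.stack ++ [r], sa.sel, []⟩,
        ⟨sb.edits ++ [e], (sb.edits.length : Int), sb.undo ++ [(sb.edits.length : Int)], [], none⟩,
        ?_, ?_, ?_⟩
      · simp [pvStepA, hop, hdata, hsa, hr]
      · simp [pvStepB, hop, hdata, he, hsel]
      · have hbuild : pvBuild (sb.edits ++ [e]) ((sb.edits.length : Int)) = some r := by
          rw [pvBuild_concat sb.edits e sa.ret W1 W2.1 W2.2 (by rw [he] at *; exact E1)]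
          simp [pvApplyEdit, he, hr, PySem.List.slice_to_natCast, PySem.List.slice_from_natCast]
        refine ⟨pvWF_append _ _ W1 W2.1 W2.2, by simp, ?_, by simp, hbuild, ?_, by simp, by rw [hsa]; rfl, rfl⟩
        · intro i hi
          simp at hi
          rcases hi with hi | rfl
          · have := W3 i hi; simp; omega
          · simp
        · simp only [List.map_append]
          rw [List.map_congr_left (fun i hi => pvBuild_append sb.edits e i W1 (W3 i hi).2), E2]
          simp [hbuild]
    | some lohi =>
      obtain ⟨lo, hi⟩ := lohi
      have hsa : sa.sel = [lo, hi] := by rw [S1, hsel]; rfl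
      set r := PySem.List.slice sa.ret none (some lo) ++ data.toList ++ PySem.List.slice sa.ret (some hi) none with hr
      set e : PvEdit := ⟨sb.cur, "APPEND", some (lo, hi), data⟩ with he
      refine ⟨⟨r, sa.stack ++ [r], [], []⟩,
        ⟨sb.edits ++ [e], (sb.edits.length : Int), sb.undo ++ [(sb.edits.length : Int)], [], none⟩,
        ?_, ?_, ?_⟩
      · simp [pvStepA, hop, hdata, hsa, hr]
      · simp [pvStepB, hop, hdata, he, hsel]
      · have hbuild : pvBuild (sb.edits ++ [e]) ((sb.edits.length : Int)) = some r := by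
          rw [pvBuild_concat sb.edits e sa.ret W1 W2.1 W2.2 (by rw [he] at *; exact E1)]
          simp [pvApplyEdit, he, hr]
        refine ⟨pvWF_append _ _ W1 W2.1 W2.2, by simp, ?_, by simp, hbuild, ?_, by simp, rfl, rfl⟩
        · intro i hi
          simp at hi
          rcases hi with hi | rfl
          · have := W3 i hi; simp; omega
          · simp
        · simp only [List.map_append]
          rw [List.map_congr_left (fun i hi => pvBuild_append sb.edits e i W1 (W3 i hi).2), E2]
          simp [hbuild]
  · by_cases hB : op = "BACKSPACE"
    · subst hB
      cases hsel : sb.sel with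
      | none =>
        have hsa : sa.sel = [] := by rw [S1, hsel]; rfl
        set r := PySem.List.slice sa.ret none (some (-1)) with hr
        set e : PvEdit := ⟨sb.cur, "BACKSPACE", none, ""⟩ with he
        refine ⟨⟨r, sa.stack ++ [r], sa.sel, []⟩,
          ⟨sb.edits ++ [e], (sb.edits.length : Int), sb.undo ++ [(sb.edits.length : Int)], [], none⟩,
          ?_, ?_, ?_⟩
        · simp [pvStepA, hop, hsa, hr]
        · simp [pvStepB, hop, hA, he, hsel]
        · have hbuild : pvBuild (sb.edits ++ [e]) ((sb.edits.length : Int)) = some r := by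
            rw [pvBuild_concat sb.edits e sa.ret W1 W2.1 W2.2 (by rw [he] at *; exact E1)]
            simp [pvApplyEdit, he, hr]
          refine ⟨pvWF_append _ _ W1 W2.1 W2.2, by simp, ?_, by simp, hbuild, ?_, by simp, by rw [hsa]; rfl, rfl⟩
          · intro i hi
            simp at hi
            rcases hi with hi | rfl
            · have := W3 i hi; simp; omega
            · simp
          · simp only [List.map_append]
            rw [List.map_congr_left (fun i hi => pvBuild_append sb.edits e i W1 (W3 i hi).2), E2]
            simp [hbuild]
      | some lohi =>
        obtain ⟨lo, hi⟩ := lohi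
        have hsa : sa.sel = [lo, hi] := by rw [S1, hsel]; rfl
        set r := PySem.List.slice sa.ret none (some lo) ++ PySem.List.slice sa.ret (some hi) none with hr
        set e : PvEdit := ⟨sb.cur, "BACKSPACE", some (lo, hi), ""⟩ with he
        refine ⟨⟨r, sa.stack ++ [r], [], []⟩,
          ⟨sb.edits ++ [e], (sb.edits.length : Int), sb.undo ++ [(sb.edits.length : Int)], [], none⟩,
          ?_, ?_, ?_⟩
        · simp [pvStepA, hop, hsa, hr, PySem.List.slice_zero_start]
        · simp [pvStepB, hop, hA, he, hsel]
        · have hbuild : pvBuild (sb.edits ++ [e]) ((sb.edits.length : Int)) = some r := by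
            rw [pvBuild_concat sb.edits e sa.ret W1 W2.1 W2.2 (by rw [he] at *; exact E1)]
            simp [pvApplyEdit, he, hr]
          refine ⟨pvWF_append _ _ W1 W2.1 W2.2, by simp, ?_, by simp, hbuild, ?_, by simp, rfl, rfl⟩
          · intro i hi
            simp at hi
            rcases hi with hi | rfl
            · have := W3 i hi; simp; omega
            · simp
          · simp only [List.map_append]
            rw [List.map_congr_left (fun i hi => pvBuild_append sb.edits e i W1 (W3 i hi).2), E2]
            simp [hbuild]
    · by_cases hBo : op = "BOLD"
      · subst hBo
        have hact : act = true := hBok rfl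
        cases hsel : sb.sel with
        | none => rw [hsel] at S2; rw [hact] at S2; simp at S2
        | some lohi =>
          obtain ⟨lo, hi⟩ := lohi
          have hsa : sa.sel = [lo, hi] := by rw [S1, hsel]; rfl
          set r := PySem.List.slice sa.ret none (some lo) ++ ['*'] ++ PySem.List.slice sa.ret (some lo) (some hi)
                     ++ ['*'] ++ PySem.List.slice sa.ret (some hi) none with hr
          set e : PvEdit := ⟨sb.cur, "BOLD", some (lo, hi), ""⟩ with he
          refine ⟨⟨r, sa.stack ++ [r], sa.sel, []⟩,
            ⟨sb.edits ++ [e], (sb.edits.length : Int), sb.undo ++ [(sb.edits.length : Int)], [], some (lo, hi)⟩,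
            ?_, ?_, ?_⟩
          · simp [pvStepA, hop, hA, hB, hsa, hr]
          · simp [pvStepB, hop, hA, hB, he, hsel]
          · have hbuild : pvBuild (sb.edits ++ [e]) ((sb.edits.length : Int)) = some r := by
              rw [pvBuild_concat sb.edits e sa.ret W1 W2.1 W2.2 (by rw [he] at *; exact E1)]
              simp [pvApplyEdit, he, hr]
            refine ⟨pvWF_append _ _ W1 W2.1 W2.2, by simp, ?_, by simp, hbuild, ?_, by simp, by rw [hsa]; rfl, by simp [pvNextAct, hact]⟩
            · intro i hi
              simp at hi
              rcases hi with hi | rfl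
              · have := W3 i hi; simp; omega
              · simp
            · simp only [List.map_append]
              rw [List.map_congr_left (fun i hi => pvBuild_append sb.edits e i W1 (W3 i hi).2), E2]
              simp [hbuild]
      · by_cases hS : op = "SELECT"
        · subst hS
          obtain ⟨s2, s3, x, y, hd2, hd3, hi2, hi3⟩ := hSok rfl
          refine ⟨⟨sa.ret, sa.stack, [x, y], []⟩, ⟨sb.edits, sb.cur, sb.undo, [], some (x, y)⟩, ?_, ?_, ?_⟩
          · simp [pvStepA, hop, hA, hB, hd2, hd3, hi2, hi3]
          · simp [pvStepB, hop, hA, hB, hBo, hd2, hd3, hi2, hi3]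
          · exact ⟨W1, W2, W3, by simp, E1, E2, by simp, rfl, rfl⟩
        · by_cases hU : op = "UNDO"
          · subst hU
            rcases List.eq_nil_or_concat sa.stack with hstk | ⟨xs, x, hxs⟩
            · have hundo : sb.undo = [] := by
                have := congrArg List.length E2
                rw [hstk] at this; simp at this
                exact this
              refine ⟨sa, sb, ?_, ?_, ?_⟩
              · simp [pvStepA, hop, hA, hB, hstk]
              · simp [pvStepB, hop, hA, hB, hBo, hS, hundo]
              · exact ⟨W1, W2, W3, W4, E1, E2, E3, S1, S2⟩
            · simp only [List.concat_eq_append] at hxs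
              have hstk_ne : sa.stack ≠ [] := by rw [hxs]; simp
              have hundo_ne : sb.undo ≠ [] := by
                intro hnil
                rw [hnil, hxs] at E2; simp at E2
              rcases List.eq_nil_or_concat sb.undo with hnil | ⟨us, u, hus⟩
              · exact absurd hnil hundo_ne
              · simp only [List.concat_eq_append] at hus
                have hsplit : us.map (pvBuild sb.edits) = xs.map some ∧ pvBuild sb.edits u = some x := by
                  apply pvMapSplit
                  rw [← hus, ← hxs, E2]
                have hpopA : PySem.List.pop? sa.stack (-1) = some (x, xs) := by
                  rw [hxs]; exact PySem.List.pop?_last xs x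
                have hpopB : PySem.List.pop? sb.undo (-1) = some (u, us) := by
                  rw [hus]; exact PySem.List.pop?_last us u
                set c' : Int := if us ≠ [] then PySem.List.pyGetD us (-1) 0 else -1 with hc'
                refine ⟨⟨if xs ≠ [] then PySem.List.pyGetD xs (-1) [] else [], xs, sa.sel, x :: sa.queue⟩,
                  ⟨sb.edits, c', us, sb.redo ++ [u], sb.sel⟩, ?_, ?_, ?_⟩
                · simp [pvStepA, hop, hA, hB, hstk_ne, hpopA]
                · simp [pvStepB, hop, hA, hB, hBo, hS, hundo_ne, hpopB, hc']
                · have hE1' : pvBuild sb.edits c' = some (if xs ≠ [] then PySem.List.pyGetD xs (-1) [] else []) := by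
                    by_cases hue : us = []
                    · have hxe : xs = [] := by
                        have := congrArg List.length hsplit.1
                        rw [hue] at this; simp at this
                        exact List.length_eq_zero_iff.mp this.symm
                      rw [hc', if_neg (by simp [hue]), hxe]
                      simp [pvBuild, pvBuildF_neg]
                    · have hxe : xs ≠ [] := by
                        intro hnil
                        rw [hnil] at hsplit
                        have := congrArg List.length hsplit.1
                        simp at this
                        exact hue this
                      obtain ⟨_, hlast⟩ := pvMapLast (pvBuild sb.edits) us xs hsplit.1 hue
                      rw [hc', if_pos hue, if_pos hxe,
                        PySem.List.pyGetD_neg_one us 0 hue, PySem.List.pyGetD_neg_one xs [] hxe,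
                        ← pvGetLastD_eq_getLast us 0 hue, ← pvGetLastD_eq_getLast xs [] hxe]
                      exact hlast
                  have hc'bound : -1 ≤ c' ∧ c' < (sb.edits.length : Int) := by
                    by_cases hue : us = []
                    · rw [hc', if_neg (by simp [hue])]
                      constructor
                      · omega
                      · have : (0:Int) ≤ (sb.edits.length : Int) := by positivity
                        omega
                    · rw [hc', if_pos hue, PySem.List.pyGetD_neg_one us 0 hue]
                      have hmem : us.getLast hue ∈ us := List.getLast_mem hue
                      have := W3 (us.getLast hue) (by rw [hus]; exact List.mem_append_left _ hmem)
                      exact this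
                  refine ⟨W1, hc'bound, ?_, ?_, hE1', hsplit.1, ?_, S1, S2⟩
                  · intro i hi
                    exact W3 i (by rw [hus]; exact List.mem_append_left _ hi)
                  · intro i hi
                    simp at hi
                    rcases hi with hi | hiu
                    · exact W4 i hi
                    · rw [hiu]
                      exact W3 u (by rw [hus]; simp)
                  · simp only [List.reverse_cons, List.map_append, List.map_cons, List.map_nil]
                    rw [E3]
                    simp [hsplit.2]
          · by_cases hR : op = "REDO"
            · subst hR
              cases hq : sa.queue with
              | nil =>
                have hredo : sb.redo = [] := by
                  have := congrArg List.length E3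
                  rw [hq] at this; simp at this
                  exact this
                refine ⟨sa, sb, ?_, ?_, ?_⟩
                · simp [pvStepA, hop, hA, hB, hq]
                · simp [pvStepB, hop, hA, hB, hBo, hS, hU, hredo]
                · exact ⟨W1, W2, W3, W4, E1, E2, E3, S1, S2⟩
              | cons q0 qt =>
                have hredo_ne : sb.redo ≠ [] := by
                  intro hnil
                  rw [hnil, hq] at E3; simp at E3
                rcases List.eq_nil_or_concat sb.redo with hnil | ⟨rs, r, hrs⟩
                · exact absurd hnil hredo_ne
                · simp only [List.concat_eq_append] at hrs
                  have hsplit : rs.map (pvBuild sb.edits) = qt.reverse.map some ∧ pvBuild sb.edits r = some q0 := by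
                    apply pvMapSplit
                    rw [← hrs, E3, hq]
                    simp
                  have hpopB : PySem.List.pop? sb.redo (-1) = some (r, rs) := by
                    rw [hrs]; exact PySem.List.pop?_last rs r
                  refine ⟨⟨q0, sa.stack, sa.sel, qt⟩, ⟨sb.edits, r, sb.undo, rs, sb.sel⟩, ?_, ?_, ?_⟩
                  · simp [pvStepA, hop, hA, hB, hq, PySem.List.pop?_zero_cons]
                  · simp [pvStepB, hop, hA, hB, hBo, hS, hU, hredo_ne, hpopB]
                  · refine ⟨W1, ?_, W3, ?_, hsplit.2, E2, hsplit.1, S1, S2⟩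
                    · exact W4 r (by rw [hrs]; simp)
                    · intro i hi
                      exact W4 i (by rw [hrs]; exact List.mem_append_left _ hi)
            · refine ⟨sa, sb, ?_, ?_, ?_⟩
              · simp [pvStepA, hop, hA, hB, hR, hU, hS, hBo]
              · simp [pvStepB, hop, hA, hB, hBo, hS, hU, hR]
              · refine ⟨W1, W2, W3, W4, E1, E2, E3, S1, ?_⟩
                simp [pvNextAct, hA, hB, hS]
                exact S2

theorem pvFold_rel (l : List (List String)) : ∀ (sa : PvStA) (sb : PvStB) (act : Bool),
    PvInv sa sb act → pvCmdsOK act l = true →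
    ∃ sa' sb',
      l.foldl (fun acc order => acc.bind (fun st => pvStepA st order)) (some sa) = some sa' ∧
      l.foldl (fun acc cmd => acc.bind (fun st => pvStepB st cmd)) (some sb) = some sb' ∧
      (∃ act', PvInv sa' sb' act') := by
  induction l with
  | nil => exact fun sa sb act h _ => ⟨sa, sb, rfl, rfl, act, h⟩
  | cons c tl ih =>
    intro sa sb act h hOK
    cases hop : PySem.List.pyGet? c 1 with
    | none => rw [pvCmdsOK, hop] at hOK; simp at hOK
    | some op =>
      simp only [pvCmdsOK, hop] at hOK
      have hnext : ∃ sa1 sb1, pvStepA sa c = some sa1 ∧ pvStepB sb c = some sb1 ∧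
          PvInv sa1 sb1 (pvNextAct op act) ∧ pvCmdsOK (pvNextAct op act) tl = true := by
        by_cases hA : op = "APPEND"
        · rw [if_pos hA] at hOK
          simp only [Bool.and_eq_true] at hOK
          obtain ⟨sa1, sb1, h1, h2, h3⟩ := pvStep_rel sa sb act c op h hop
            (fun _ => hOK.1) (fun hc => absurd (hA ▸ hc) (by simp)) (fun hc => absurd (hA ▸ hc) (by simp))
          exact ⟨sa1, sb1, h1, h2, h3, by simpa [pvNextAct, hA] using hOK.2⟩
        · rw [if_neg hA] at hOK
          by_cases hB : op = "BACKSPACE"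
          · rw [if_pos hB] at hOK
            obtain ⟨sa1, sb1, h1, h2, h3⟩ := pvStep_rel sa sb act c op h hop
              (fun hc => absurd (hB ▸ hc) (by simp)) (fun hc => absurd (hB ▸ hc) (by simp))
              (fun hc => absurd (hB ▸ hc) (by simp))
            exact ⟨sa1, sb1, h1, h2, h3, by simpa [pvNextAct, hA, hB] using hOK⟩
          · rw [if_neg hB] at hOK
            by_cases hS : op = "SELECT"
            · rw [if_pos hS] at hOK
              simp only [Bool.and_eq_true] at hOK
              have hSok : ∃ s2 s3 x y, PySem.List.pyGet? c 2 = some s2 ∧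
                  PySem.List.pyGet? c 3 = some s3 ∧ PySem.Int.ofStr? s2 = some x ∧ PySem.Int.ofStr? s3 = some y := by
                have := hOK.1
                cases hd2 : PySem.List.pyGet? c 2 with
                | none => rw [hd2] at this; simp at this
                | some s2 =>
                  cases hd3 : PySem.List.pyGet? c 3 with
                  | none => rw [hd2, hd3] at this; simp at this
                  | some s3 =>
                    rw [hd2, hd3] at this
                    simp only [Bool.and_eq_true, Option.isSome_iff_exists] at this
                    obtain ⟨⟨x, hx⟩, ⟨y, hy⟩⟩ := this
                    exact ⟨s2, s3, x, y, rfl, rfl, hx, hy⟩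
              obtain ⟨sa1, sb1, h1, h2, h3⟩ := pvStep_rel sa sb act c op h hop
                (fun hc => absurd (hS ▸ hc) (by simp)) (fun _ => hSok)
                (fun hc => absurd (hS ▸ hc) (by simp))
              exact ⟨sa1, sb1, h1, h2, h3, by simpa [pvNextAct, hA, hB, hS] using hOK.2⟩
            · rw [if_neg hS] at hOK
              by_cases hBo : op = "BOLD"
              · rw [if_pos hBo] at hOK
                simp only [Bool.and_eq_true] at hOK
                obtain ⟨sa1, sb1, h1, h2, h3⟩ := pvStep_rel sa sb act c op h hop
                  (fun hc => absurd (hBo ▸ hc) (by simp)) (fun hc => absurd (hBo ▸ hc) (by simp))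
                  (fun _ => hOK.1)
                exact ⟨sa1, sb1, h1, h2, h3, by simpa [pvNextAct, hA, hB, hS, hBo] using hOK.2⟩
              · rw [if_neg hBo] at hOK
                obtain ⟨sa1, sb1, h1, h2, h3⟩ := pvStep_rel sa sb act c op h hop
                  (fun hc => absurd hc hA) (fun hc => absurd hc hS) (fun hc => absurd hc hBo)
                exact ⟨sa1, sb1, h1, h2, h3, by simpa [pvNextAct, hA, hB, hS] using hOK⟩
      obtain ⟨sa1, sb1, h1, h2, h3, h4⟩ := hnext
      simp only [List.foldl_cons, Option.bind_some, h1, h2]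
      exact ih sa1 sb1 (pvNextAct op act) h3 h4

-- ===== VERDICT (by name: the statement is the Claim_ definition above) =====
theorem textEditor_spec : Claim_equal_textEditor := by
  intro input _ hPre
  unfold Pre_textEditor at hPre
  unfold Spec_textEditor textEditor textEditor_alt
  have hinv : PvInv ⟨[], [], [], []⟩ ⟨[], -1, [], [], none⟩ false := by
    refine ⟨fun k hk => by simp at hk, by simp, by simp, by simp, ?_, rfl, rfl, rfl, rfl⟩
    simp [pvBuild, pvBuildF]
  obtain ⟨sa', sb', ha, hb, _, hinv'⟩ := pvFold_rel (pvSorted input) ⟨[], [], [], []⟩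
    ⟨[], -1, [], [], none⟩ false hinv hPre
  rw [ha, hb]
  obtain ⟨_, _, _, _, E1, _⟩ := hinv'
  simp only [E1]
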